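-- pv_equiv track=rewrite | github.com/itjiedev/jieadminpanel-win | adminpanel/jiefoundation/utils.py | get_unique_missing_elements
-- ===== SOURCE A (Python) =====
-- def get_unique_missing_elements(sub_list, main_list):
--     """
--     返回在子列表中但不在主列表中的唯一元素（去重版本）
--
--     参数:
--         sub_list (list): 子列表
--         main_list (list): 主列表
--
--     返回:
--         list: 不在主列表中的唯一元素（去重，保持在sub_list中首次出现的顺序）
--
--     使用示例:
--         get_unique_missing_elements([1, 2, 2, 3], [1, 2])  # 返回 [3]
--         get_unique_missing_elements([1, 2, 3, 2, 4], [1])  # 返回 [2, 3, 4]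
--     """
--     main_set = set(main_list)
--     missing_elements = []
--     seen = set()
--
--     for item in sub_list:
--         if item not in main_set and item not in seen:
--             missing_elements.append(item)
--             seen.add(item)
--
--     return missing_elements
-- ===== SOURCE B (Python) =====
-- def get_unique_missing_elements(sub_list, main_list):
--     main_set = set(main_list)
--     # stable sort groups equal values together; ties keep index order,
--     # so the head of each equal-value run carries that value's first index
--     pairs = sorted(enumerate(sub_list), key=lambda p: p[1])
--     firsts = []
--     prev = None
--     for i, x in pairs:
--         if prev is None or x != prev:
--             prev = x
--             if x not in main_set:
--                 firsts.append((i, x))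
--     firsts.sort(key=lambda p: p[0])
--     return [x for _, x in firsts]
-- ===== Notes on version B (the rewrite author's own statement) =====
-- stated objective: alternative
-- what changed: Replaces A's streaming seen-set loop by sort-based deduplication: stable-sort (index, value) pairs by value so each value's first occurrence heads its run, scan run heads dropping main_set values, then re-sort the kept pairs by index to restore first-occurrence order.
import Mathlib
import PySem

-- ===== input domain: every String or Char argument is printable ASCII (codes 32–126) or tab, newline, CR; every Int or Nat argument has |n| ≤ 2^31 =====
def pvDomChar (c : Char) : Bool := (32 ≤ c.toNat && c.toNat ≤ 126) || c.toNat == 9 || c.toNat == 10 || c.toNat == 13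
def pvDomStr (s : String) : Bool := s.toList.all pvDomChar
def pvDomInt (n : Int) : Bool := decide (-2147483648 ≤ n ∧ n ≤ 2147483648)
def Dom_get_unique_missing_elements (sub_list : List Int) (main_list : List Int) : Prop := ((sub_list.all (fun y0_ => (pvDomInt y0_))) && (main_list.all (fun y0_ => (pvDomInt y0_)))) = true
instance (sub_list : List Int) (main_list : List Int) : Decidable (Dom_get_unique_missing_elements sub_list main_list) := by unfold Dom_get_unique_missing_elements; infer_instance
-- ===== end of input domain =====

-- B replaces A's streaming seen-set loop by sort-based deduplication: stable-sort (index, value)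
-- pairs by value, keep each run head (the value's first index) unless the value is in main_set,
-- then re-sort the kept pairs by index (alternative algorithm, not claimed faster).

-- ===== PORT A =====
-- A's for-loop over sub_list, carrying (missing_elements, seen) exactly as in the Python.
def getUniqueMissingLoop (items : List Int) (main_set : PySem.Set Int)
    (missing : List Int) (seen : PySem.Set Int) : List Int :=
  match items with
  | [] => missing
  | item :: rest =>
    if ¬ (PySem.Set.contains main_set item) ∧ ¬ (PySem.Set.contains seen item) then
      getUniqueMissingLoop rest main_set (missing ++ [item]) (PySem.Set.add seen item)
    else
      getUniqueMissingLoop rest main_set missing seen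

def get_unique_missing_elements (sub_list : List Int) (main_list : List Int) : List Int :=
  let main_set : PySem.Set Int := PySem.Set.ofList main_list
  getUniqueMissingLoop sub_list main_set [] PySem.Set.empty

-- ===== PORT B =====
-- B's for-loop over the value-sorted pairs, carrying (prev, firsts) exactly as in Source B.
def guRunHeadLoop (ps : List (Int × Int)) (main_set : PySem.Set Int)
    (prev : Option Int) (firsts : List (Int × Int)) : List (Int × Int) :=
  match ps with
  | [] => firsts
  | (i, x) :: rest =>
    if prev ≠ some x then          -- Python: prev is None or x != prev
      if ¬ (PySem.Set.contains main_set x) then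
        guRunHeadLoop rest main_set (some x) (firsts ++ [(i, x)])
      else
        guRunHeadLoop rest main_set (some x) firsts
    else
      guRunHeadLoop rest main_set prev firsts

def get_unique_missing_elements_alt (sub_list : List Int) (main_list : List Int) : List Int :=
  let main_set : PySem.Set Int := PySem.Set.ofList main_list
  let pairs := PySem.List.sorted (PySem.List.enumerate sub_list 0) (fun p => p.2)
  let firsts := guRunHeadLoop pairs main_set none []
  (PySem.List.sorted firsts (fun p => p.1)).map (fun p => p.2)

-- ===== PRECONDITION & SPEC =====
def Spec_get_unique_missing_elements (sub_list : List Int) (main_list : List Int) (out : List Int) : Prop := out = get_unique_missing_elements_alt sub_list main_list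
instance (sub_list : List Int) (main_list : List Int) (out : List Int) : Decidable (Spec_get_unique_missing_elements sub_list main_list out) := by unfold Spec_get_unique_missing_elements; infer_instance

-- ===== CLAIM =====
def Claim_equal_get_unique_missing_elements : Prop := ∀ (sub_list : List Int) (main_list : List Int), Dom_get_unique_missing_elements sub_list main_list → Spec_get_unique_missing_elements sub_list main_list (get_unique_missing_elements sub_list main_list)

-- ===== LEMMAS AND PROOFS =====

-- Strict lexicographic order on (index, value) pairs, compared value first.
def lexPI (a b : Int × Int) : Prop := a.2 < b.2 ∨ (a.2 = b.2 ∧ a.1 < b.1)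

-- The membership filter A's loop is characterised by (positional first-occurrence test).
def guPredB (sub_list : List Int) (m : PySem.Set Int) (q : Int × Int) : Bool :=
  !(PySem.Set.contains m q.2) && !((PySem.List.slice sub_list none (some q.1)).contains q.2)

-- ---------- A's loop = positional filter ----------
theorem loop_eq_filter (m : PySem.Set Int) (full : List Int) (xs : List Int) :
    ∀ (p acc : List Int) (seen : PySem.Set Int),
    full = p ++ xs →
    (∀ y : Int, y ∉ m → (y ∈ seen ↔ y ∈ p)) →
    getUniqueMissingLoop xs m acc seen =
      acc ++ ((PySem.List.enumerate xs ((p.length : Int))).filter (guPredB full m)).map (·.2) := by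
  induction xs with
  | nil =>
    intro p acc seen _ _
    simp [getUniqueMissingLoop, PySem.List.enumerate_nil]
  | cons x xs ih =>
    intro p acc seen hfull hinv
    have hslice : PySem.List.slice full none (some ((p.length : Int))) = p := by
      rw [PySem.List.slice_to_natCast, hfull]
      exact List.take_left
    have hcast : ((p.length : Int) + 1) = (((p ++ [x]).length : Nat) : Int) := by
      simp
    simp only [getUniqueMissingLoop, PySem.List.enumerate_cons, List.filter_cons]
    by_cases hm : x ∈ m
    · rw [if_neg (by simp [PySem.Set.contains, hm])]
      have hinv' : ∀ y : Int, y ∉ m → (y ∈ seen ↔ y ∈ p ++ [x]) := by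
        intro y hy
        have hyx : y ≠ x := fun h => hy (h ▸ hm)
        simp [hyx, hinv y hy]
      have := ih (p ++ [x]) acc seen (by simpa using hfull) hinv'
      rw [hcast, this]
      simp [guPredB, PySem.Set.contains, hm]
    · by_cases hseen : x ∈ seen
      · rw [if_neg (by simp [PySem.Set.contains, hseen])]
        have hp : x ∈ p := (hinv x hm).mp hseen
        have hinv' : ∀ y : Int, y ∉ m → (y ∈ seen ↔ y ∈ p ++ [x]) := by
          intro y hy
          constructor
          · intro h; simp [(hinv y hy).mp h]
          · intro h
            rcases List.mem_append.mp h with h | h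
            · exact (hinv y hy).mpr h
            · simp at h; exact h ▸ hseen
        have := ih (p ++ [x]) acc seen (by simpa using hfull) hinv'
        rw [hcast, this]
        simp [guPredB, PySem.Set.contains, hm, hslice, hp]
      · rw [if_pos ⟨by simp [PySem.Set.contains, hm], by simp [PySem.Set.contains, hseen]⟩]
        have hp : x ∉ p := fun h => hseen ((hinv x hm).mpr h)
        have haddseen : PySem.Set.add seen x = seen ++ [x] := by
          simp [PySem.Set.add, PySem.Set.contains, hseen]
        have hinv' : ∀ y : Int, y ∉ m → (y ∈ seen ++ [x] ↔ y ∈ p ++ [x]) := by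
          intro y hy; simp [hinv y hy]
        rw [haddseen]
        have := ih (p ++ [x]) (acc ++ [x]) (seen ++ [x]) (by simpa using hfull) hinv'
        rw [hcast, this]
        simp [guPredB, PySem.Set.contains, hm, hslice, hp]

-- ---------- insertBy preserves lex sortedness ----------
theorem insertBy_lex (x : Int × Int) (ys : List (Int × Int))
    (hpw : ys.Pairwise lexPI) (hidx : ∀ y ∈ ys, y.1 < x.1) :
    (PySem.List.insertBy (fun a b => decide (a.2 < b.2)) x ys).Pairwise lexPI := by
  induction ys with
  | nil => simp [PySem.List.insertBy]
  | cons y ys ih =>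
    simp only [PySem.List.insertBy]
    rcases List.pairwise_cons.mp hpw with ⟨hy, hys⟩
    split_ifs with hlt
    · -- x :: y :: ys
      refine List.pairwise_cons.mpr ⟨?_, hpw⟩
      intro z hz
      rcases hz with _ | hz
      · exact Or.inl (by simpa using hlt)
      · have := hy _ (by assumption)
        rcases this with h | ⟨h1, _⟩
        · exact Or.inl (lt_trans (by simpa using hlt) h)
        · exact Or.inl (h1 ▸ (by simpa using hlt))
    · -- y :: insertBy x ys
      refine List.pairwise_cons.mpr ⟨?_, ih hys (fun z hz => hidx z (List.mem_cons_of_mem _ hz))⟩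
      intro z hz
      rcases (PySem.List.mem_insertBy _ _ _ _).mp hz with rfl | hz
      · -- z = x
        rcases lt_or_eq_of_le (not_lt.mp (by simpa using hlt)) with h | h
        · exact Or.inl h
        · exact Or.inr ⟨h, hidx y (List.mem_cons_self)⟩
      · exact hy z hz

theorem foldl_insert_lex (xs : List (Int × Int)) :
    ∀ acc : List (Int × Int),
    acc.Pairwise lexPI →
    (∀ a ∈ acc, ∀ b ∈ xs, a.1 < b.1) →
    xs.Pairwise (fun a b => a.1 < b.1) →
    (xs.foldl (fun acc x => PySem.List.insertBy (fun a b => decide ((fun p : Int × Int => p.2) a < (fun p : Int × Int => p.2) b)) x acc) acc).Pairwise lexPI := by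
  induction xs with
  | nil => intro acc h _ _; simpa using h
  | cons x xs ih =>
    intro acc hacc hbound hxs
    rcases List.pairwise_cons.mp hxs with ⟨hx, hxs'⟩
    simp only [List.foldl_cons]
    refine ih _ (insertBy_lex x acc hacc (fun a ha => hbound a ha x List.mem_cons_self)) ?_ hxs'
    intro a ha b hb
    rcases (PySem.List.mem_insertBy _ _ _ _).mp ha with rfl | ha
    · exact hx b hb
    · exact hbound a ha b (List.mem_cons_of_mem _ hb)

-- Sorting index-distinct pairs by value yields a strictly lex-sorted list.
theorem sorted_pairs_lex (xs : List (Int × Int))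
    (h : xs.Pairwise (fun a b => a.1 < b.1)) :
    (PySem.List.sorted xs (fun p => p.2)).Pairwise lexPI := by
  rw [PySem.List.sorted_eq_foldl_insertBy]
  exact foldl_insert_lex xs [] (List.Pairwise.nil) (by simp) h

-- ---------- B's run-head loop, rewritten without the accumulator ----------
def guAux (m : PySem.Set Int) (ps : List (Int × Int)) (prev : Option Int) : List (Int × Int) :=
  match ps with
  | [] => []
  | (i, x) :: rest =>
    if prev ≠ some x ∧ ¬ (PySem.Set.contains m x) then
      (i, x) :: guAux m rest (some x)
    else
      guAux m rest (some x)

theorem guRunHeadLoop_eq_aux (m : PySem.Set Int) (ps : List (Int × Int)) :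
    ∀ (prev : Option Int) (firsts : List (Int × Int)),
    guRunHeadLoop ps m prev firsts = firsts ++ guAux m ps prev := by
  induction ps with
  | nil => intro prev firsts; simp [guRunHeadLoop, guAux]
  | cons q rest ih =>
    intro prev firsts
    obtain ⟨i, x⟩ := q
    simp only [guRunHeadLoop, guAux]
    by_cases h1 : prev = some x
    · rw [if_neg (by simpa using h1), if_neg (by simp [h1]), h1, ih]
    · rw [if_pos (by simpa using h1)]
      by_cases h2 : x ∈ m
      · rw [if_neg (by simp [PySem.Set.contains, h2]),
            if_neg (by simp [PySem.Set.contains, h2]), ih]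
      · rw [if_pos (by simp [PySem.Set.contains, h2]),
            if_pos ⟨by simpa using h1, by simp [PySem.Set.contains, h2]⟩, ih]
        simp

-- Membership in the run-head scan of a lex-sorted pair list: exactly the pairs whose value
-- is outside m (and past prev) carrying the minimal index for that value.
theorem mem_guAux (m : PySem.Set Int) (ps : List (Int × Int)) :
    ∀ (prev : Option Int),
    ps.Pairwise lexPI →
    (∀ v : Int, prev = some v → ∀ r ∈ ps, v ≤ r.2) →
    ∀ q : Int × Int,
    (q ∈ guAux m ps prev ↔
      q ∈ ps ∧ q.2 ∉ m ∧ prev ≠ some q.2 ∧ ∀ r ∈ ps, r.2 = q.2 → q.1 ≤ r.1) := by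
  induction ps with
  | nil => intro prev _ _ q; simp [guAux]
  | cons hd rest ih =>
    intro prev hpw hprev q
    obtain ⟨i, x⟩ := hd
    rcases List.pairwise_cons.mp hpw with ⟨hhd, hrest⟩
    have hnext : ∀ v : Int, some x = some v → ∀ r ∈ rest, v ≤ r.2 := by
      intro v hv r hr
      cases Option.some.inj hv
      rcases hhd r hr with h | ⟨h, _⟩
      · exact le_of_lt h
      · exact le_of_eq h
    have IH := ih (some x) hrest hnext
    simp only [guAux]
    split_ifs with hcond
    · -- run head kept
      obtain ⟨hprevx, hmx⟩ := hcond
      constructor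
      · intro hq
        rcases List.mem_cons.mp hq with rfl | hq
        · refine ⟨List.mem_cons_self, by simpa [PySem.Set.contains] using hmx, hprevx, ?_⟩
          intro r hr hrx
          rcases List.mem_cons.mp hr with rfl | hr
          · exact le_refl _
          · rcases hhd r hr with h | ⟨_, h⟩
            · exact absurd hrx (by simp; omega)
            · exact le_of_lt h
        · rcases (IH q).mp hq with ⟨hq1, hq2, hq3, hq4⟩
          have hxq : x < q.2 := by
            rcases hhd q hq1 with h | ⟨h, _⟩
            · exact h
            · exact absurd (congrArg some h) hq3
          refine ⟨List.mem_cons_of_mem _ hq1, hq2, ?_, ?_⟩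
          · intro hpv
            rcases prev with _ | v
            · simp at hpv
            · have := hprev v rfl (i, x) List.mem_cons_self
              have hvq : v = q.2 := Option.some.inj hpv
              simp only at this
              omega
          · intro r hr hrx
            rcases List.mem_cons.mp hr with rfl | hr
            · exact absurd hrx (by simp; omega)
            · exact hq4 r hr hrx
      · intro ⟨hq1, hq2, hq3, hq4⟩
        rcases List.mem_cons.mp hq1 with rfl | hq1
        · exact List.mem_cons_self
        · have hxq : x ≠ q.2 := by
            intro h
            have h1 := hq4 (i, x) List.mem_cons_self h
            rcases hhd q hq1 with h2 | ⟨_, h2⟩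
            · omega
            · simp only at h1; omega
          refine List.mem_cons_of_mem _ ((IH q).mpr ⟨hq1, hq2, by simpa using hxq, ?_⟩)
          intro r hr hrx
          exact hq4 r (List.mem_cons_of_mem _ hr) hrx
    · -- run head skipped: x ∈ m, or value run continues (prev = some x)
      rw [IH q]
      have hcond' : prev = some x ∨ PySem.Set.contains m x = true := by
        by_cases hpx : prev = some x
        · exact Or.inl hpx
        · exact Or.inr (by_contra fun h => hcond ⟨hpx, by simpa using h⟩)
      constructor
      · intro ⟨hq1, hq2, hq3, hq4⟩
        have hxq : x ≠ q.2 := by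
          intro h
          exact hq3 (by simp [h])
        refine ⟨List.mem_cons_of_mem _ hq1, hq2, ?_, ?_⟩
        · rcases hcond' with hpx | hmx2
          · intro hpv
            exact hxq (Option.some.inj (hpx.symm.trans hpv))
          · intro hpv
            rcases prev with _ | v
            · simp at hpv
            · have h1 := hprev v rfl (i, x) List.mem_cons_self
              have h2 : v = q.2 := Option.some.inj hpv
              have h3 : x < q.2 := by
                rcases hhd q hq1 with h | ⟨h, _⟩
                · exact h
                · exact absurd h hxq
              simp only at h1; omega
        · intro r hr hrx
          rcases List.mem_cons.mp hr with rfl | hr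
          · exact absurd hrx hxq
          · exact hq4 r hr hrx
      · intro ⟨hq1, hq2, hq3, hq4⟩
        have hxq : x ≠ q.2 := by
          rcases hcond' with hpx | hmx2
          · intro h
            exact hq3 (hpx.trans (by rw [h]))
          · intro h
            exact hq2 (by rw [← h]; simpa [PySem.Set.contains] using hmx2)
        have hq1' : q ∈ rest := by
          rcases List.mem_cons.mp hq1 with rfl | h
          · exact (hxq rfl).elim
          · exact h
        refine ⟨hq1', hq2, fun h => hxq (Option.some.inj h), ?_⟩
        intro r hr hrx
        exact hq4 r (List.mem_cons_of_mem _ hr) hrx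

-- Values of the kept run heads are strictly increasing (so the list is nodup).
theorem pairwise_val_guAux (m : PySem.Set Int) (ps : List (Int × Int)) :
    ∀ (prev : Option Int),
    ps.Pairwise lexPI →
    (∀ v : Int, prev = some v → ∀ r ∈ ps, v ≤ r.2) →
    (guAux m ps prev).Pairwise (fun a b => a.2 < b.2) := by
  induction ps with
  | nil => intro prev _ _; simp [guAux]
  | cons hd rest ih =>
    intro prev hpw hprev
    obtain ⟨i, x⟩ := hd
    rcases List.pairwise_cons.mp hpw with ⟨hhd, hrest⟩
    have hnext : ∀ v : Int, some x = some v → ∀ r ∈ rest, v ≤ r.2 := by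
      intro v hv r hr
      cases Option.some.inj hv
      rcases hhd r hr with h | ⟨h, _⟩
      · exact le_of_lt h
      · exact le_of_eq h
    simp only [guAux]
    split_ifs with hcond
    · refine List.pairwise_cons.mpr ⟨?_, ih (some x) hrest hnext⟩
      intro z hz
      rcases (mem_guAux m rest (some x) hrest hnext z).mp hz with ⟨hz1, _, hz3, _⟩
      rcases hhd z hz1 with h | ⟨h, _⟩
      · exact h
      · exact absurd (congrArg some h) hz3
    · exact ih (some x) hrest hnext

-- ===== VERDICT =====
theorem get_unique_missing_elements_spec : Claim_equal_get_unique_missing_elements := by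
  intro sub_list main_list _
  unfold Spec_get_unique_missing_elements get_unique_missing_elements get_unique_missing_elements_alt
  set m : PySem.Set Int := PySem.Set.ofList main_list with hm
  set E := PySem.List.enumerate sub_list 0 with hE
  set S := E.filter (guPredB sub_list m) with hS
  -- A = S.map (·.2)
  have hA : getUniqueMissingLoop sub_list m [] PySem.Set.empty = S.map (·.2) := by
    have h := loop_eq_filter m sub_list sub_list [] [] PySem.Set.empty
      rfl (by intro y _; simp [PySem.Set.empty])
    simpa using h
  -- analysis of B
  set pairs := PySem.List.sorted E (fun p => p.2) with hpairs
  have hElt : E.Pairwise (fun a b : Int × Int => a.1 < b.1) := PySem.List.pairwise_lt_enumerate _ _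
  have hlex : pairs.Pairwise lexPI := sorted_pairs_lex E hElt
  have hperm : pairs.Perm E := PySem.List.sorted_perm _ _ _
  have hprevnone : ∀ v : Int, (none : Option Int) = some v → ∀ r ∈ pairs, v ≤ r.2 := by
    intro v hv; simp at hv
  set F := guAux m pairs none with hF
  have hBloop : guRunHeadLoop pairs m none [] = F := by
    rw [guRunHeadLoop_eq_aux, hF]; simp
  -- membership of F and S coincide
  have hmemF : ∀ q : Int × Int, q ∈ F ↔ q ∈ E ∧ q.2 ∉ m ∧ ∀ r ∈ E, r.2 = q.2 → q.1 ≤ r.1 := by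
    intro q
    rw [hF, mem_guAux m pairs none hlex hprevnone q]
    constructor
    · intro ⟨h1, h2, _, h4⟩
      exact ⟨hperm.mem_iff.mp h1, h2, fun r hr => h4 r (hperm.mem_iff.mpr hr)⟩
    · intro ⟨h1, h2, h4⟩
      exact ⟨hperm.mem_iff.mpr h1, h2, by simp, fun r hr => h4 r (hperm.mem_iff.mp hr)⟩
  have hmemS : ∀ q : Int × Int, q ∈ S ↔ q ∈ E ∧ q.2 ∉ m ∧ ∀ r ∈ E, r.2 = q.2 → q.1 ≤ r.1 := by
    intro q
    rw [hS, List.mem_filter]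
    constructor
    · intro ⟨hq, hpred⟩
      rcases (PySem.List.mem_enumerate_iff _ _ _).mp hq with ⟨k, hk, rfl⟩
      simp only [guPredB, Bool.and_eq_true, Bool.not_eq_true'] at hpred
      obtain ⟨hp1, hp2⟩ := hpred
      refine ⟨hq, by simpa [PySem.Set.contains] using hp1, ?_⟩
      intro r hr hrv
      rcases (PySem.List.mem_enumerate_iff _ _ _).mp hr with ⟨j, hj, rfl⟩
      simp only [zero_add] at *
      -- hp2: value not in sub_list[:k]
      rw [PySem.List.slice_to_natCast] at hp2
      by_contra hcon
      rw [not_le] at hcon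
      have hjk : j < k := by exact_mod_cast hcon
      have : sub_list[j] ∈ sub_list.take k := by
        rw [List.mem_take_iff_getElem]
        exact ⟨j, by omega, rfl⟩
      rw [← hrv] at hp2
      simp [List.contains_eq_mem, this] at hp2
    · intro ⟨hq, h2, h4⟩
      refine ⟨hq, ?_⟩
      rcases (PySem.List.mem_enumerate_iff _ _ _).mp hq with ⟨k, hk, rfl⟩
      simp only [zero_add] at *
      simp only [guPredB, Bool.and_eq_true, Bool.not_eq_true']
      constructor
      · simpa [PySem.Set.contains] using h2
      · rw [PySem.List.slice_to_natCast]
        simp only [List.contains_eq_mem, decide_eq_false_iff_not]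
        intro hmem
        rw [List.mem_take_iff_getElem] at hmem
        obtain ⟨j, hj, hv⟩ := hmem
        have hjlen : j < sub_list.length := lt_of_lt_of_le hj (min_le_right _ _)
        have hrE : ((j : Int), sub_list[j]) ∈ E := by
          rw [PySem.List.mem_enumerate_iff]
          exact ⟨j, hjlen, by simp⟩
        have := h4 _ hrE (by simpa using hv)
        simp only at this
        have hjk : j < k := lt_of_lt_of_le hj (min_le_left _ _)
        omega
  -- nodups
  have hndF : F.Nodup := by
    have := pairwise_val_guAux m pairs none hlex hprevnone
    exact (this.imp (fun h => by intro hab; rw [hab] at h; exact lt_irrefl _ h))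
  have hSlt : S.Pairwise (fun a b : Int × Int => a.1 < b.1) := hElt.filter _
  have hndS : S.Nodup :=
    hSlt.imp (fun h => by intro hab; rw [hab] at h; exact lt_irrefl _ h)
  -- F ~ S, S strictly index-sorted, hence sorted F (·.1) = S
  have hpermFS : S.Perm F := by
    refine (List.perm_ext_iff_of_nodup hndS hndF).mpr ?_
    intro q; rw [hmemF q, hmemS q]
  have hsortF : PySem.List.sorted F (fun p : Int × Int => p.1) = S :=
    PySem.List.sorted_eq_of_perm_of_pairwise_lt F S _ hpermFS hSlt
  simp only [hA, hBloop, hsortF]
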